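-- pv_equiv track=rewrite | github.com/Kasib-hub/CodeWars | chasers_schedule.py | solution
-- ===== SOURCE A (Python) =====
-- import math
--
-- def solution(s, t):
-- #     distance = speed * time
-- #     speed * 2 for one unit of time
-- #     speed decreased by 1 afterwards and 1 unit of time can't sprint
-- #     get maximum possible distance
--     distance = s * t
--
-- #     max sprints will always be half the time, round up for odd times
-- # for each max sprint, check if the distance is greater than 3 which is the minimum distance to sprint
--     max_sprints = math.ceil(t / 2)
--     for i in range(max_sprints):
--
--         # checking if the distance is greater than 3 at each sprint
--         if (s - 3 * i > 0):
--             distance += s - 3 * i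
--     return distance
--     pass
-- ===== SOURCE B (Python) =====
-- def solution(s, t):
--     # closed form: k positive sprint bonuses s, s-3, s-6, ... are summed
--     m = (t + 1) // 2               # ceil(t/2), number of sprint slots
--     if m < 0:
--         m = 0
--     p = (s + 2) // 3 if s > 0 else 0   # how many terms s - 3*i stay positive
--     k = min(m, p)
--     return s * t + k * s - 3 * (k * (k - 1)) // 2
-- ===== Notes on version B (the rewrite author's own statement) =====
-- stated objective: faster
-- what changed: Replaced the per-sprint loop accumulating the positive bonuses s-3*i with a closed-form count of positive terms and an arithmetic-series sum.
import Mathlib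
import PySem

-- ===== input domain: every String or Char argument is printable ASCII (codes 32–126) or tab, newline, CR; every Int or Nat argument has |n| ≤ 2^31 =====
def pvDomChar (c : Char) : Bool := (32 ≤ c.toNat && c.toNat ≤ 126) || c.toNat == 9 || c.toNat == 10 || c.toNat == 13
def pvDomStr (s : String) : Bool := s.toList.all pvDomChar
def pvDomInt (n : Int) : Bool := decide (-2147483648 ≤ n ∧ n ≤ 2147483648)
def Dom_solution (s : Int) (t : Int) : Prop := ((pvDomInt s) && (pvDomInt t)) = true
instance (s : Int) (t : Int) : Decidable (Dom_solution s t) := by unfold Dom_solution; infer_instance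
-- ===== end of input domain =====

-- B replaces A's O(t) loop over sprint slots with a closed-form arithmetic-series sum (objective: faster).

-- ===== PORT A =====
-- math.ceil(t / 2): on |t| ≤ 2^31 the float t/2 is exact, so this is ceiling division,
-- ported exactly as -((-t) // 2).
def solution (s : Int) (t : Int) : Int :=
  let distance := s * t
  let max_sprints := -(PySem.Int.floordiv (-t) 2)
  (PySem.List.pyRange 0 max_sprints 1).foldl
    (fun distance i => if s - 3 * i > 0 then distance + (s - 3 * i) else distance)
    distance

-- ===== PORT B =====
def solution_alt (s : Int) (t : Int) : Int :=
  let m0 := PySem.Int.floordiv (t + 1) 2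
  let m := if m0 < 0 then 0 else m0
  let p := if s > 0 then PySem.Int.floordiv (s + 2) 3 else 0
  let k := min m p
  s * t + k * s - PySem.Int.floordiv (3 * (k * (k - 1))) 2

-- ===== PRECONDITION & SPEC =====
def Spec_solution (s : Int) (t : Int) (out : Int) : Prop := out = solution_alt s t
instance (s : Int) (t : Int) (out : Int) : Decidable (Spec_solution s t out) := by unfold Spec_solution; infer_instance

-- ===== CLAIM (what is proved, stated in full; the proofs are below) =====
def Claim_equal_solution : Prop := ∀ (s : Int) (t : Int), Dom_solution s t → Spec_solution s t (solution s t)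

-- ===== LEMMAS AND PROOFS =====

-- number of indices i with s - 3*i > 0 (0 when s ≤ 0)
def pvP (s : Int) : Nat := if s > 0 then ((s + 2) / 3).toNat else 0

-- loop invariant for A's fold restated over List.range
theorem pv_loop (s : Int) (n : Nat) (d : Int) :
    (List.range n).foldl
      (fun (d : Int) (k : Nat) => if s - 3 * (k : Int) > 0 then d + (s - 3 * (k : Int)) else d) d
    = d + ((min n (pvP s) : Int) * s - 3 * ((min n (pvP s) : Int) * ((min n (pvP s) : Int) - 1)) / 2) := by
  induction n with
  | zero => simp
  | succ n ih =>
    rw [List.range_succ, List.foldl_append, ih]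
    simp only [List.foldl_cons, List.foldl_nil]
    by_cases h : s - 3 * (n : Int) > 0
    · have hn : n < pvP s := by unfold pvP; split_ifs with hs <;> omega
      have h1 : min (n + 1) (pvP s) = n + 1 := by omega
      have h2 : min n (pvP s) = n := by omega
      simp only [if_pos h, ← Nat.cast_min, h1, h2]
      have e2 : 3 * ((((n : Int)) + 1) * (n : Int)) = 3 * ((n : Int) * ((n : Int) - 1)) + 3 * (n : Int) * 2 := by ring
      push_cast
      rw [show ((n : Int) + 1 - 1) = (n : Int) from by ring, e2,
        Int.add_mul_ediv_right _ _ (by norm_num : (2:Int) ≠ 0)]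
      set q := 3 * ((n : Int) * ((n : Int) - 1)) / 2
      ring
    · have hn : pvP s ≤ n := by unfold pvP; split_ifs with hs <;> omega
      have h1 : min (n + 1) (pvP s) = pvP s := by omega
      have h2 : min n (pvP s) = pvP s := by omega
      simp only [if_neg h, ← Nat.cast_min, h1, h2]

theorem pv_solution_eq (s t : Int) : solution s t = solution_alt s t := by
  unfold solution solution_alt
  show (PySem.List.pyRange 0 (-(PySem.Int.floordiv (-t) 2)) 1).foldl
      (fun distance i => if s - 3 * i > 0 then distance + (s - 3 * i) else distance) (s * t)
    = s * t + (min (if PySem.Int.floordiv (t + 1) 2 < 0 then 0 else PySem.Int.floordiv (t + 1) 2)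
          (if s > 0 then PySem.Int.floordiv (s + 2) 3 else 0)) * s
      - PySem.Int.floordiv (3 * ((min (if PySem.Int.floordiv (t + 1) 2 < 0 then 0 else PySem.Int.floordiv (t + 1) 2)
          (if s > 0 then PySem.Int.floordiv (s + 2) 3 else 0)) * ((min (if PySem.Int.floordiv (t + 1) 2 < 0 then 0 else PySem.Int.floordiv (t + 1) 2)
          (if s > 0 then PySem.Int.floordiv (s + 2) 3 else 0)) - 1))) 2
  simp only [show ∀ x : Int, PySem.Int.floordiv x 2 = x / 2 from fun x => PySem.Int.floordiv_eq_ediv_of_pos (by norm_num),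
      show PySem.Int.floordiv (s + 2) 3 = (s + 2) / 3 from PySem.Int.floordiv_eq_ediv_of_pos (by norm_num),
      PySem.List.pyRange_one]
  simp only [zero_add, List.foldl_map]
  rw [pv_loop s ((-(-t / 2) - 0).toNat) (s * t)]
  have hk : ((min ((-(-t / 2) - 0).toNat) (pvP s) : Nat) : Int)
      = min (if (t + 1) / 2 < 0 then 0 else (t + 1) / 2) (if s > 0 then (s + 2) / 3 else 0) := by
    unfold pvP
    split_ifs <;> push_cast <;> omega
  simp only [← Nat.cast_min]
  rw [hk]
  set k : Int := min (if (t + 1) / 2 < 0 then 0 else (t + 1) / 2) (if s > 0 then (s + 2) / 3 else 0)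
  set q := 3 * (k * (k - 1)) / 2
  ring

-- ===== VERDICT (by name: the statement is the Claim_ definition above) =====
theorem solution_spec : Claim_equal_solution := by
  intro s t _
  exact pv_solution_eq s t
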